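-- pv_equiv track=rewrite | github.com/teamsspaul/Thinkpad | Summer/pauls_scripts_unmodified/Defaults.py | loop_index
-- ===== SOURCE A (Python) =====
-- def loop_index(list1,index):
--     """
--     This function will loop through values in list and return non-outside range index
--     """
--     while True:
--         try:
--             list1[index]
--             break
--         except IndexError:
--             index=index-len(list1)
--     return(index)
-- ===== SOURCE B (Python) =====
-- def loop_index(list1, index):
--     """Arithmetic form: positive overflow wraps via a single modulo; in-range indices
--     (including negative ones down to -len) are returned unchanged."""
--     n = len(list1)
--     if index >= n:
--         return index % n
--     return index
-- ===== Notes on version B (the rewrite author's own statement) =====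
-- stated objective: simpler
-- what changed: Replaces the repeated-subtraction try/except loop with a single modulo for index >= len and identity otherwise.
import Mathlib
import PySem

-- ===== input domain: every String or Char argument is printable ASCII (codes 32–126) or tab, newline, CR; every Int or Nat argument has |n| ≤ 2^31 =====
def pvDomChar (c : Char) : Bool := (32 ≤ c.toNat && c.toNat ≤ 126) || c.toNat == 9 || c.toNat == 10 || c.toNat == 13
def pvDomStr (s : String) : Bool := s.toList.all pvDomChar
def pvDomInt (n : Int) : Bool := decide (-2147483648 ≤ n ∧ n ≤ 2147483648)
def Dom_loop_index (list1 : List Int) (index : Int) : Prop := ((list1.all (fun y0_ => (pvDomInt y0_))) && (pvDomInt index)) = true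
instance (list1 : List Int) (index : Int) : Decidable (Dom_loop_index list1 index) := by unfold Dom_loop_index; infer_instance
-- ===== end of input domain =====

-- B replaces A's repeated-subtraction try/except loop by direct arithmetic (modulo on
-- positive overflow, identity in range); equivalence is claimed on Pre_ (where A terminates).

-- ===== PORT A =====
-- A's 'while True: try list1[index]; break; except IndexError: index -= len(list1)'
-- ported with a fuel guard (fuel only makes the recursion total; on Pre_ it never runs out).
def loopA (list1 : List Int) : Nat → Int → Int
  | 0, i => i
  | fuel + 1, i =>
    match PySem.List.pyGet? list1 i with
    | some _ => i
    | none => loopA list1 fuel (i - list1.length)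

def loop_index (list1 : List Int) (index : Int) : Int :=
  loopA list1 (index.toNat + 1) index

-- ===== PORT B =====
def loop_index_alt (list1 : List Int) (index : Int) : Int :=
  let n : Int := list1.length
  if index ≥ n then PySem.Int.mod index n else index

-- ===== PRECONDITION & SPEC =====
-- Pre_ excludes exactly the inputs on which A loops forever: the empty list (IndexError
-- repeats with index unchanged) and index < -len (index only becomes more negative).
def Pre_loop_index (list1 : List Int) (index : Int) : Prop :=
  list1 ≠ [] ∧ -(list1.length : Int) ≤ index
instance (list1 : List Int) (index : Int) : Decidable (Pre_loop_index list1 index) := by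
  unfold Pre_loop_index; infer_instance

def pvWitness_loop_index : List Int × Int := ([3, 1, 2], 7)

def Spec_loop_index (list1 : List Int) (index : Int) (out : Int) : Prop := out = loop_index_alt list1 index
instance (list1 : List Int) (index : Int) (out : Int) : Decidable (Spec_loop_index list1 index out) := by unfold Spec_loop_index; infer_instance

-- ===== CLAIM (what is proved, stated in full; the proofs are below) =====
def Claim_equal_loop_index : Prop := ∀ (list1 : List Int) (index : Int), Dom_loop_index list1 index → Pre_loop_index list1 index → Spec_loop_index list1 index (loop_index list1 index)

-- ===== LEMMAS AND PROOFS =====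

theorem loopA_mod (list1 : List Int) (hne : list1 ≠ []) :
    ∀ (fuel : Nat) (i : Int), 0 ≤ i → i < (fuel : Int) * list1.length →
      loopA list1 fuel i = i % list1.length := by
  have hn : 0 < (list1.length : Int) := by
    have : list1.length ≠ 0 := fun h => hne (List.eq_nil_of_length_eq_zero h)
    omega
  intro fuel
  induction fuel with
  | zero => intro i h0 hlt; simp at hlt; omega
  | succ f ih =>
    intro i h0 hlt
    by_cases hlt' : i < (list1.length : Int)
    · cases hget : PySem.List.pyGet? list1 i with
      | none =>
        rw [PySem.List.pyGet?_eq_none_iff] at hget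
        unfold PySem.Raise.InRange at hget
        omega
      | some v =>
        simp only [loopA, hget]
        exact (Int.emod_eq_of_lt h0 hlt').symm
    · have hget : PySem.List.pyGet? list1 i = none := by
        rw [PySem.List.pyGet?_eq_none_iff]
        unfold PySem.Raise.InRange
        omega
      simp only [loopA, hget]
      have hring : ((f : Int) + 1) * list1.length = (f : Int) * list1.length + list1.length := by ring
      have := ih (i - list1.length) (by omega) (by push_cast at hlt ⊢; omega)
      rw [this, Int.sub_emod_right]

theorem loop_index_spec : Claim_equal_loop_index := by
  intro list1 index _ hpre
  obtain ⟨hne, hge⟩ := hpre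
  have hn : 0 < (list1.length : Int) := by
    have : list1.length ≠ 0 := fun h => hne (List.eq_nil_of_length_eq_zero h)
    omega
  unfold Spec_loop_index loop_index loop_index_alt
  by_cases hlt : index < (list1.length : Int)
  · -- in range: first probe succeeds
    cases hget : PySem.List.pyGet? list1 index with
    | none =>
      rw [PySem.List.pyGet?_eq_none_iff] at hget
      unfold PySem.Raise.InRange at hget
      omega
    | some v => simp [loopA, hget]; omega
  · -- positive overflow: loopA computes index % len
    have h0 : 0 ≤ index := by omega
    have hfuel : index < ((index.toNat + 1 : Nat) : Int) * list1.length := by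
      have hc : ((index.toNat + 1 : Nat) : Int) = index + 1 := by push_cast; omega
      rw [hc]
      nlinarith
    rw [loopA_mod list1 hne (index.toNat + 1) index h0 hfuel]
    rw [if_pos (by omega)]
    rw [PySem.Int.mod_eq_emod_of_pos hn]

-- ===== VERDICT (by name: the statement is the Claim_ definition above) =====
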